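-- pv_equiv track=rewrite | github.com/S3nna13/Aurelius | src/inference/draft_tree.py | parent_indices
-- ===== SOURCE A (Python) =====
-- def parent_indices(branching_factor: int, depth: int) -> list[int | None]:
--     """Return parent indices for a full k-ary tree up to depth."""
--     if branching_factor <= 0 or depth < 0:
--         raise ValueError("branching_factor must be positive and depth non-negative")
--     parents: list[int | None] = [None]
--     frontier = [0]
--     next_index = 1
--     for _ in range(depth):
--         new_frontier = []
--         for parent in frontier:
--             for _ in range(branching_factor):
--                 parents.append(parent)
--                 new_frontier.append(next_index)
--                 next_index += 1
--         frontier = new_frontier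
--     return parents
-- ===== SOURCE B (Python) =====
-- def parent_indices(branching_factor: int, depth: int) -> list[int | None]:
--     """Return parent indices for a full k-ary tree up to depth."""
--     if branching_factor <= 0 or depth < 0:
--         raise ValueError("branching_factor must be positive and depth non-negative")
--     n = sum(branching_factor ** d for d in range(depth + 1))
--     return [None] + [(i - 1) // branching_factor for i in range(1, n)]
-- ===== Notes on version B (the rewrite author's own statement) =====
-- stated objective: simpler
-- what changed: Replaces the BFS frontier/next_index bookkeeping with the closed-form node count n = sum(k**d) and the closed-form parent (i-1)//k for each node index.
import Mathlib
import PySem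

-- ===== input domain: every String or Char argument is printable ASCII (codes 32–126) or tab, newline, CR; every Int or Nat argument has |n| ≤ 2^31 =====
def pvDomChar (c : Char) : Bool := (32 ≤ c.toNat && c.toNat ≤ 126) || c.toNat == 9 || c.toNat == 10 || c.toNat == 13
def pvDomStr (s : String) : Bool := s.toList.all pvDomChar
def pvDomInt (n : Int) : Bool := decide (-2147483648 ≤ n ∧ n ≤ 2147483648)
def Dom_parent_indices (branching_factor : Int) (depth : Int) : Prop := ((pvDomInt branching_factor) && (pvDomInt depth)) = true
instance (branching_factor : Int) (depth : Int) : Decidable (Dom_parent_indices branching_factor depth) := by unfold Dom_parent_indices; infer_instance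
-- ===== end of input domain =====

-- B replaces A's BFS frontier/next_index bookkeeping with the closed-form node
-- count n = sum k^d and the closed-form parent (i-1)//k (objective: simpler).


-- ===== PORT A =====
-- inner loop: for _ in range(branching_factor): parents.append(parent); new_frontier.append(next_index); next_index += 1
def piInner (k : Int) (parent : Int) (s : List (Option Int) × List Int × Int) :
    List (Option Int) × List Int × Int :=
  (PySem.List.pyRange 0 k 1).foldl
    (fun s _ => (s.1 ++ [some parent], s.2.1 ++ [s.2.2], s.2.2 + 1)) s

-- outer loop: for _ in range(depth), state (parents, frontier, next_index)
def piOuter (k : Int) : Nat → List (Option Int) × List Int × Int → List (Option Int) × List Int × Int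
  | 0, s => s
  | t+1, s =>
      let s' := s.2.1.foldl (fun s p => piInner k p s) (s.1, ([] : List Int), s.2.2)
      piOuter k t s'

def parent_indices (branching_factor : Int) (depth : Int) : List (Option Int) :=
  if branching_factor ≤ 0 ∨ depth < 0 then []  -- A raises ValueError here; excluded by Pre_
  else (piOuter branching_factor depth.toNat ([none], [0], 1)).1

-- ===== PORT B =====
def parent_indices_alt (branching_factor : Int) (depth : Int) : List (Option Int) :=
  if branching_factor ≤ 0 ∨ depth < 0 then []  -- B raises ValueError here; excluded by Pre_
  else
    let n := ((PySem.List.pyRange 0 (depth + 1) 1).map (fun d => branching_factor ^ d.toNat)).sum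
    [none] ++ (PySem.List.pyRange 1 n 1).map (fun i => some (PySem.Int.floordiv (i - 1) branching_factor))

-- ===== PRECONDITION & SPEC =====
-- Pre_: exactly the inputs where the Python A returns normally (it raises ValueError otherwise)
def Pre_parent_indices (branching_factor : Int) (depth : Int) : Prop :=
  0 < branching_factor ∧ 0 ≤ depth
instance (branching_factor : Int) (depth : Int) : Decidable (Pre_parent_indices branching_factor depth) := by unfold Pre_parent_indices; infer_instance
def pvWitness_parent_indices : Int × Int := (2, 3)

def Spec_parent_indices (branching_factor : Int) (depth : Int) (out : List (Option Int)) : Prop := out = parent_indices_alt branching_factor depth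
instance (branching_factor : Int) (depth : Int) (out : List (Option Int)) : Decidable (Spec_parent_indices branching_factor depth out) := by unfold Spec_parent_indices; infer_instance

-- ===== CLAIM (what is proved, stated in full; the proofs are below) =====
def Claim_equal_parent_indices : Prop := ∀ (branching_factor : Int) (depth : Int), Dom_parent_indices branching_factor depth → Pre_parent_indices branching_factor depth → Spec_parent_indices branching_factor depth (parent_indices branching_factor depth)

-- ===== LEMMAS AND PROOFS =====

-- the closed-form parents list for the first n nodes
def pvTgt (k n : Int) : List (Option Int) :=
  [none] ++ (PySem.List.pyRange 1 n 1).map (fun i => some (PySem.Int.floordiv (i - 1) k))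

-- next_index evolution across outer iterations: b ↦ k*b + 1
def pvN (k : Int) : Nat → Int → Int
  | 0, b => b
  | t+1, b => pvN k t (k * b + 1)

-- geometric sum 1 + k + … + k^(t-1)
def pvS (k : Int) (t : Nat) : Int := ((List.range t).map (fun j => k ^ j)).sum

theorem pvInner_gen (p : Int) :
    ∀ (l : List Int) (s : List (Option Int) × List Int × Int),
    l.foldl (fun s (_ : Int) => (s.1 ++ [some p], s.2.1 ++ [s.2.2], s.2.2 + 1)) s =
      (s.1 ++ List.replicate l.length (some p),
       s.2.1 ++ PySem.List.pyRange s.2.2 (s.2.2 + l.length) 1,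
       s.2.2 + l.length) := by
  intro l
  induction l with
  | nil => intro s; simp [PySem.List.pyRange_one_eq_nil]
  | cons x l ih =>
      intro s
      simp only [List.foldl_cons, ih, List.length_cons]
      have h1 : s.2.2 + ((l.length + 1 : Nat) : Int) = (s.2.2 + 1) + (l.length : Int) := by
        push_cast; ring
      refine Prod.ext ?_ (Prod.ext ?_ ?_)
      · simp [List.replicate_succ, List.append_assoc]
      · simp only
        rw [List.append_assoc, h1]
        conv_rhs => rw [PySem.List.pyRange_one_cons (by omega)]
        rfl
      · simp only; omega

theorem pvInner_eq (k : Int) (p : Int) (s : List (Option Int) × List Int × Int) :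
    piInner k p s =
      (s.1 ++ List.replicate k.toNat (some p),
       s.2.1 ++ PySem.List.pyRange s.2.2 (s.2.2 + k.toNat) 1,
       s.2.2 + k.toNat) := by
  unfold piInner
  rw [pvInner_gen]
  have h : (PySem.List.pyRange 0 k 1).length = k.toNat := by
    rw [PySem.List.length_pyRange_one]; omega
  rw [h]

theorem pvMid_eq (k : Int) (hk : 0 < k) (fr : List Int) :
    ∀ (s : List (Option Int) × List Int × Int),
    fr.foldl (fun s p => piInner k p s) s =
      (s.1 ++ fr.flatMap (fun p => List.replicate k.toNat (some p)),
       s.2.1 ++ PySem.List.pyRange s.2.2 (s.2.2 + k * fr.length) 1,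
       s.2.2 + k * fr.length) := by
  induction fr with
  | nil => intro s; simp [PySem.List.pyRange_one_eq_nil]
  | cons p fr ih =>
      intro s
      rw [List.foldl_cons, pvInner_eq, ih]
      have hkt : ((k.toNat : Int)) = k := by omega
      have hnn : (0 : Int) ≤ k * fr.length :=
        mul_nonneg hk.le (Int.natCast_nonneg fr.length)
      refine Prod.ext ?_ (Prod.ext ?_ ?_)
      · simp [List.append_assoc]
      · simp only [hkt, List.length_cons]
        rw [List.append_assoc]
        have h1 : s.2.2 + k * ((fr.length + 1 : Nat) : Int) = (s.2.2 + k) + k * fr.length := by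
          push_cast; ring
        rw [h1, ← PySem.List.pyRange_one_append s.2.2 (s.2.2 + k) ((s.2.2 + k) + k * fr.length)
              (by omega) (by linarith)]
      · simp only [hkt, List.length_cons]; push_cast; ring

theorem pvChunk (k p : Int) (hk : 0 < k) :
    (PySem.List.pyRange (k * p + 1) (k * p + 1 + k) 1).map
        (fun i => some (PySem.Int.floordiv (i - 1) k)) =
      List.replicate k.toNat (some p) := by
  rw [PySem.List.pyRange_one, List.map_map]
  have h : (k * p + 1 + k - (k * p + 1)).toNat = k.toNat := by omega
  rw [h]
  refine List.eq_replicate_iff.mpr ⟨by simp, ?_⟩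
  intro b hb
  simp only [List.mem_map, List.mem_range] at hb
  obtain ⟨j, hj, rfl⟩ := hb
  have hjk : (j : Int) < k := by omega
  simp only [Function.comp_apply, Option.some.injEq]
  rw [PySem.Int.floordiv_eq_iff_of_pos hk]
  have h1 : p * k = k * p := by ring
  have h2 : (p + 1) * k = k * p + k := by ring
  rw [h1, h2]
  constructor <;> omega

theorem pvFlat (k : Int) (hk : 0 < k) :
    ∀ (m : Nat) (a : Int),
    (PySem.List.pyRange a (a + m) 1).flatMap (fun p => List.replicate k.toNat (some p)) =
      (PySem.List.pyRange (k * a + 1) (k * (a + m) + 1) 1).map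
        (fun i => some (PySem.Int.floordiv (i - 1) k)) := by
  intro m
  induction m with
  | zero => intro a; simp [PySem.List.pyRange_one_eq_nil]
  | succ m ih =>
      intro a
      have hcast : a + ((m + 1 : Nat) : Int) = (a + 1) + (m : Int) := by push_cast; ring
      rw [hcast, PySem.List.pyRange_one_cons (by omega), List.flatMap_cons, ih (a + 1)]
      rw [← pvChunk k a hk]
      rw [← List.map_append]
      congr 1
      have h1 : k * a + 1 + k = k * (a + 1) + 1 := by ring
      rw [h1]
      rw [← PySem.List.pyRange_one_append (k * a + 1) (k * (a + 1) + 1) (k * (a + 1 + (m : Int)) + 1)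
            (by omega)
            (by
              have h2 : k * (a + 1 + (m : Int)) = k * (a + 1) + k * m := by ring
              have h3 : (0 : Int) ≤ k * m := mul_nonneg hk.le (Int.natCast_nonneg m)
              linarith)]

theorem pvTgt_append (k b b' : Int) (hb : 1 ≤ b) (hb' : b ≤ b') :
    pvTgt k b ++ (PySem.List.pyRange b b' 1).map
        (fun i => some (PySem.Int.floordiv (i - 1) k)) = pvTgt k b' := by
  unfold pvTgt
  rw [List.append_assoc, ← List.map_append,
      ← PySem.List.pyRange_one_append 1 b b' hb hb']

theorem pvOuter_inv (k : Int) (hk : 0 < k) :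
    ∀ (t : Nat) (a b : Int), 0 ≤ a → b = k * a + 1 →
    (piOuter k t (pvTgt k b, PySem.List.pyRange a b 1, b)).1 = pvTgt k (pvN k t b) := by
  intro t
  induction t with
  | zero => intro a b _ _; simp [piOuter, pvN]
  | succ t ih =>
      intro a b ha hb
      have hka : (0 : Int) ≤ (k - 1) * a := mul_nonneg (by omega) ha
      have hka' : (k - 1) * a = k * a - a := by ring
      have hab : a < b := by linarith
      have hb1 : 1 ≤ b := by linarith
      show (piOuter k t _).1 = _
      rw [pvMid_eq k hk]
      have hlen : ((PySem.List.pyRange a b 1).length : Int) = b - a := by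
        rw [PySem.List.length_pyRange_one]; omega
      have hm : b + k * ((PySem.List.pyRange a b 1).length : Int) = k * b + 1 := by
        rw [hlen]
        have h4 : k * (b - a) = k * b - k * a := by ring
        linarith
      have hflat : (PySem.List.pyRange a b 1).flatMap (fun p => List.replicate k.toNat (some p)) =
          (PySem.List.pyRange b (k * b + 1) 1).map
            (fun i => some (PySem.Int.floordiv (i - 1) k)) := by
        have hba : a + (((b - a).toNat : Nat) : Int) = b := by omega
        have h := pvFlat k hk (b - a).toNat a
        rw [hba] at h
        rw [h, ← hb]
      simp only [hm, hflat, List.nil_append]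
      have hkb : (0 : Int) ≤ (k - 1) * b := mul_nonneg (by omega) (by linarith)
      have hkb' : (k - 1) * b = k * b - b := by ring
      rw [pvTgt_append k b (k * b + 1) hb1 (by linarith)]
      have : pvN k (t + 1) b = pvN k t (k * b + 1) := rfl
      rw [this, ← ih b (k * b + 1) (by omega) rfl]

theorem pvS_succ (k : Int) (t : Nat) : pvS k (t + 1) = pvS k t + k ^ t := by
  simp [pvS, List.range_succ]

theorem pvN_eq (k : Int) : ∀ (t : Nat) (b : Int), pvN k t b = k ^ t * b + pvS k t := by
  intro t
  induction t with
  | zero => intro b; simp [pvN, pvS]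
  | succ t ih =>
      intro b
      show pvN k t (k * b + 1) = _
      rw [ih, pvS_succ, pow_succ]
      ring

theorem pvSum_eq (k d : Int) (hd : 0 ≤ d) :
    ((PySem.List.pyRange 0 (d + 1) 1).map (fun dd => k ^ dd.toNat)).sum = pvS k (d.toNat + 1) := by
  rw [PySem.List.pyRange_one, List.map_map]
  have h : (d + 1 - 0).toNat = d.toNat + 1 := by omega
  rw [h]
  unfold pvS
  congr 1
  apply List.map_congr_left
  intro j _
  simp

-- ===== VERDICT (by name: the statement is the Claim_ definition above) =====
theorem parent_indices_spec : Claim_equal_parent_indices := by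
  intro k d _ hpre
  obtain ⟨hk, hd⟩ := hpre
  unfold Spec_parent_indices parent_indices parent_indices_alt
  rw [if_neg (by omega), if_neg (by omega)]
  have hinit : (([none] : List (Option Int)), ([0] : List Int), (1 : Int)) =
      (pvTgt k 1, PySem.List.pyRange 0 1 1, (1 : Int)) := by
    refine Prod.ext ?_ (Prod.ext ?_ rfl)
    · simp [pvTgt, PySem.List.pyRange_one_eq_nil]
    · simp only
      decide
  rw [hinit, pvOuter_inv k hk d.toNat 0 1 le_rfl (by ring)]
  rw [pvSum_eq k d hd]
  have : pvN k d.toNat 1 = pvS k (d.toNat + 1) := by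
    rw [pvN_eq, pvS_succ]; ring
  rw [this]
  rfl
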